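-- pv_equiv track=rewrite | github.com/OussamaLay/Graph_Burning_Problem | algo_recherche.py | successeurs_p
-- ===== SOURCE A (Python) =====
-- def successeurs_p(graphe, etat_actuel):
--     """
--     Génère l'état suivant en propageant la brûlure aux voisins des sommets déjà brûlés.
--     :param graphe: Le graphe sous forme de dictionnaire.
--     :param etat_actuel: Dictionnaire contenant l'état actuel des sommets (brûlés ou non brûlés).
--     :return: Nouveau dictionnaire représentant l'état des sommets après propagation.
--     """
--
--     brulage = False  # Indique si un sommet a été brûlé dans cet appel de la fonction
--
--     # Copier l'état actuel pour générer le nouvel état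
--     nouvel_etat = etat_actuel.copy()
--
--     # Récupérer tous les sommets brûlés
--     sommets_brules = [sommet for sommet, etat in nouvel_etat.items() if etat == 1]
--
--     # Propager la brûlure aux voisins des sommets brûlés
--     for sommet in sommets_brules:
--         for voisin in graphe.get(sommet, []):  # Obtenir les voisins dans la liste d'adjacence
--             if nouvel_etat[voisin] == 0:  # Brûler uniquement les sommets non brûlés
--                 nouvel_etat[voisin] = 1
--                 brulage = True
--
--     return nouvel_etat, brulage
-- ===== SOURCE B (Python) =====
-- def successeurs_p(graphe, etat_actuel):
--     """Pull-based propagation: instead of pushing fire from each burned vertex to its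
--     out-neighbors (A), decide each vertex's new state by querying whether some burned
--     vertex points to it."""
--     # the set of currently burned vertices
--     brules = {sommet for sommet, etat in etat_actuel.items() if etat == 1}
--
--     def touche(s):
--         # is s an out-neighbor of some burned vertex?
--         return any(s in graphe.get(t, []) for t in brules)
--
--     nouvel_etat = {}
--     brulage = False
--     for s, e in etat_actuel.items():
--         if e == 0 and touche(s):
--             nouvel_etat[s] = 1
--             brulage = True
--         else:
--             nouvel_etat[s] = e
--     return nouvel_etat, brulage
-- ===== Notes on version B (the rewrite author's own statement) =====
-- stated objective: alternative
-- what changed: A pushes fire outward: it scans the burned vertices and mutates a copied dict at each unburned out-neighbor while tracking a flag; B pulls: it builds the set of burned vertices once and then, for each vertex independently, computes its new value by querying whether any burned vertex has it in its adjacency list, assembling a fresh dict in one pass; B trades A's O(V+E) push for a per-target reverse-adjacency query (quadratic worst case) and never mutates shared state.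
import Mathlib
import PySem

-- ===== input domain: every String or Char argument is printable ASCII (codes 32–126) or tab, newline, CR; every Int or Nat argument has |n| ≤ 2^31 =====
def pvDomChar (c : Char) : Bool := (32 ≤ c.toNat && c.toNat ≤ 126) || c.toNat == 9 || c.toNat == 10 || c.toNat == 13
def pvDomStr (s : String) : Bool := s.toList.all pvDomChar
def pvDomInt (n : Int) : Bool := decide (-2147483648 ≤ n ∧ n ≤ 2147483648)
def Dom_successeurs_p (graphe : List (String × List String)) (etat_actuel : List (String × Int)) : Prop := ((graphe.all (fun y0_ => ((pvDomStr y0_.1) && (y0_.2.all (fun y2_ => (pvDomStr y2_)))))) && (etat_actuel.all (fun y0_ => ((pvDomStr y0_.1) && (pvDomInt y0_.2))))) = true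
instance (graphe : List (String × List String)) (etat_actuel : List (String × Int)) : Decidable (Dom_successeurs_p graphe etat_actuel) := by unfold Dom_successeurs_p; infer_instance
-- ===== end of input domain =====

-- B replaces A's push-style propagation (scan burned vertices, mutate a copy at each
-- unburned out-neighbor) by a pull-style pass (for each vertex, query whether some burned
-- vertex points to it); objective: alternative algorithm, not claimed faster.

-- ===== PORT A =====
def successeurs_p (graphe : List (String × List String)) (etat_actuel : List (String × Int)) : (List (String × Int)) × Bool :=
  let brulage := false
  let nouvel_etat : PySem.Dict String Int := PySem.Dict.mk etat_actuel   -- etat_actuel.copy()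
  let sommets_brules : List String :=
    (nouvel_etat.items.filter (fun p => p.2 == 1)).map Prod.fst
  let st :=
    sommets_brules.foldl (fun (st : PySem.Dict String Int × Bool) sommet =>
      (PySem.Dict.getD (PySem.Dict.mk graphe) sommet []).foldl (fun st2 voisin =>
        -- 'nouvel_etat[voisin] == 0' raises KeyError when voisin is absent: excluded by Pre_
        if st2.1.get? voisin == some 0 then (st2.1.insert voisin 1, true) else st2) st)
      (nouvel_etat, brulage)
  (st.1.items, st.2)

-- ===== PORT B =====
def successeurs_p_alt (graphe : List (String × List String)) (etat_actuel : List (String × Int)) : (List (String × Int)) × Bool :=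
  let brules : PySem.Set String :=
    PySem.Set.ofList (((PySem.Dict.mk etat_actuel).items.filter (fun p => p.2 == 1)).map Prod.fst)
  let touche : String → Bool := fun s =>
    brules.any (fun t => (PySem.Dict.getD (PySem.Dict.mk graphe) t []).contains s)
  let st :=
    (PySem.Dict.mk etat_actuel).items.foldl
      (fun (st : PySem.Dict String Int × Bool) p =>
        if p.2 == 0 && touche p.1 then (st.1.insert p.1 1, true)
        else (st.1.insert p.1 p.2, st.2))
      (PySem.Dict.empty, false)
  (st.1.items, st.2)

-- ===== PRECONDITION & SPEC =====
-- Pre_ requires (a) the keys of etat_actuel to be distinct — a Python dict cannot carry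
-- duplicate keys, so this excludes no Python-representable input — and (b) every neighbor
-- of a burned vertex to be a key of etat_actuel: exactly where Python A raises KeyError.
def Pre_successeurs_p (graphe : List (String × List String)) (etat_actuel : List (String × Int)) : Prop :=
  (etat_actuel.map Prod.fst).Nodup ∧
  ∀ p ∈ etat_actuel, p.2 = (1 : Int) →
    ∀ v ∈ PySem.Dict.getD (PySem.Dict.mk graphe) p.1 [],
      ((PySem.Dict.mk etat_actuel).get? v).isSome = true
instance (graphe : List (String × List String)) (etat_actuel : List (String × Int)) : Decidable (Pre_successeurs_p graphe etat_actuel) := by unfold Pre_successeurs_p; infer_instance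

def pvWitness_successeurs_p : (List (String × List String)) × (List (String × Int)) :=
  ([("a", ["b"]), ("b", ["a", "c"])], [("a", 1), ("b", 0), ("c", 0)])

def Spec_successeurs_p (graphe : List (String × List String)) (etat_actuel : List (String × Int)) (out : (List (String × Int)) × Bool) : Prop := out = successeurs_p_alt graphe etat_actuel
instance (graphe : List (String × List String)) (etat_actuel : List (String × Int)) (out : (List (String × Int)) × Bool) : Decidable (Spec_successeurs_p graphe etat_actuel out) := by unfold Spec_successeurs_p; infer_instance

-- ===== CLAIM (what is proved, stated in full; the proofs are below) =====
def Claim_equal_successeurs_p : Prop := ∀ (graphe : List (String × List String)) (etat_actuel : List (String × Int)), Dom_successeurs_p graphe etat_actuel → Pre_successeurs_p graphe etat_actuel → Spec_successeurs_p graphe etat_actuel (successeurs_p graphe etat_actuel)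

-- ===== LEMMAS AND PROOFS =====

-- The state list after burning exactly the vertices of N.
def applyN (N : List String) (l : List (String × Int)) : List (String × Int) :=
  l.map (fun p => (p.1, if N.contains p.1 then 1 else p.2))

theorem applyN_nil (l : List (String × Int)) : applyN [] l = l := by
  simp [applyN]

theorem get?_mk_applyN (l : List (String × Int)) (N : List String) (v : String) :
    (PySem.Dict.mk (applyN N l)).get? v
      = ((PySem.Dict.mk l).get? v).map (fun e => if N.contains v then 1 else e) := by
  induction l with
  | nil => simp [applyN, PySem.Dict.get?]
  | cons p rest ih =>
    obtain ⟨k, e⟩ := p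
    simp only [applyN, List.map_cons, PySem.Dict.get?_mk_cons] at ih ⊢
    by_cases h : k = v
    · subst h; simp
    · simp only [beq_iff_eq, h, if_false]
      exact ih

theorem insert_applyN (l : List (String × Int)) (N : List String) (v : String)
    (hv : ((PySem.Dict.mk l).get? v).isSome = true) :
    (PySem.Dict.mk (applyN N l)).insert v 1 = PySem.Dict.mk (applyN (N ++ [v]) l) := by
  have hc : (PySem.Dict.mk (applyN N l)).contains v = true := by
    rw [PySem.Dict.contains_eq_isSome_get?, get?_mk_applyN]
    simpa using hv
  apply PySem.Dict.ext
  rw [PySem.Dict.items_insert_of_contains _ _ hc]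
  show (applyN N l).map _ = applyN (N ++ [v]) l
  simp only [applyN, List.map_map]
  apply List.map_congr_left
  intro p _
  by_cases h : p.1 = v
  · simp [h, Function.comp]
  · simp [h, Function.comp]

-- A's inner loop over one vertex's neighbor list, tracked against applyN.
theorem inner_eq (l : List (String × Int)) (vs : List String) :
    ∀ (N : List String) (b : Bool), b = !N.isEmpty →
    vs.foldl (fun (st2 : PySem.Dict String Int × Bool) voisin =>
        if st2.1.get? voisin == some 0 then (st2.1.insert voisin 1, true) else st2)
      (PySem.Dict.mk (applyN N l), b)
    = (PySem.Dict.mk (applyN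
        (vs.foldl (fun acc v =>
          if (PySem.Dict.mk l).get? v == some 0 then PySem.Set.add acc v else acc) N) l),
       !(vs.foldl (fun acc v =>
          if (PySem.Dict.mk l).get? v == some 0 then PySem.Set.add acc v else acc) N).isEmpty) := by
  induction vs with
  | nil => intro N b hb; subst hb; rfl
  | cons v vs ih =>
    intro N b hb
    simp only [List.foldl_cons]
    by_cases h0 : (PySem.Dict.mk l).get? v = some 0
    · by_cases hc : v ∈ N
      · rw [if_neg (by rw [get?_mk_applyN, h0]; simp [hc]),
           if_pos (by rw [h0]; simp)]
        have hB : PySem.Set.add N v = N := by simp [PySem.Set.add, PySem.Set.contains, hc]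
        rw [hB]
        exact ih N b hb
      · rw [if_pos (by rw [get?_mk_applyN, h0]; simp [hc]),
           if_pos (by rw [h0]; simp)]
        rw [insert_applyN l N v (by rw [h0]; rfl)]
        have hB : PySem.Set.add N v = N ++ [v] := by simp [PySem.Set.add, PySem.Set.contains, hc]
        rw [hB]
        exact ih (N ++ [v]) true (by simp)
    · have hA : ¬ (((PySem.Dict.mk (applyN N l)).get? v == some 0) = true) := by
        rw [get?_mk_applyN]
        cases hg : (PySem.Dict.mk l).get? v with
        | none => simp
        | some e =>
          have he : e ≠ 0 := by rintro rfl; exact h0 hg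
          by_cases hc : v ∈ N <;> simp [hc, he]
      rw [if_neg hA, if_neg (by simp [h0])]
      exact ih N b hb

-- A's outer loop over the burned-vertex list.
theorem outer_eq (graphe : List (String × List String)) (l : List (String × Int))
    (ss : List String) :
    ∀ (N : List String) (b : Bool), b = !N.isEmpty →
    ss.foldl (fun (st : PySem.Dict String Int × Bool) sommet =>
        (PySem.Dict.getD (PySem.Dict.mk graphe) sommet []).foldl (fun st2 voisin =>
          if st2.1.get? voisin == some 0 then (st2.1.insert voisin 1, true) else st2) st)
      (PySem.Dict.mk (applyN N l), b)
    = (PySem.Dict.mk (applyN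
        (ss.foldl (fun acc s =>
          (PySem.Dict.getD (PySem.Dict.mk graphe) s []).foldl (fun acc2 v =>
            if (PySem.Dict.mk l).get? v == some 0 then PySem.Set.add acc2 v else acc2) acc) N) l),
       !(ss.foldl (fun acc s =>
          (PySem.Dict.getD (PySem.Dict.mk graphe) s []).foldl (fun acc2 v =>
            if (PySem.Dict.mk l).get? v == some 0 then PySem.Set.add acc2 v else acc2) acc) N).isEmpty) := by
  induction ss with
  | nil => intro N b hb; subst hb; rfl
  | cons s ss ih =>
    intro N b hb
    simp only [List.foldl_cons]
    rw [inner_eq l _ N b hb]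
    exact ih _ _ rfl

-- Membership in the frontier set built by A's inner loop.
theorem mem_inner (l : List (String × Int)) (vs : List String) (v : String) :
    ∀ acc : List String,
    (v ∈ vs.foldl (fun acc2 x =>
        if (PySem.Dict.mk l).get? x == some 0 then PySem.Set.add acc2 x else acc2) acc)
    ↔ v ∈ acc ∨ ((PySem.Dict.mk l).get? v = some 0 ∧ v ∈ vs) := by
  induction vs with
  | nil => intro acc; simp
  | cons x vs ih =>
    intro acc
    simp only [List.foldl_cons]
    by_cases h0 : (PySem.Dict.mk l).get? x = some 0
    · rw [if_pos (by rw [h0]; simp), ih]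
      rw [PySem.Set.mem_add]
      constructor
      · rintro (( h | rfl) | h)
        · exact Or.inl h
        · exact Or.inr ⟨h0, List.mem_cons_self ..⟩
        · exact Or.inr ⟨h.1, List.mem_cons_of_mem _ h.2⟩
      · rintro (h | ⟨hg, hm⟩)
        · exact Or.inl (Or.inl h)
        · rcases List.mem_cons.mp hm with rfl | hm
          · exact Or.inl (Or.inr rfl)
          · exact Or.inr ⟨hg, hm⟩
    · rw [if_neg (by simp [h0]), ih]
      constructor
      · rintro (h | h)
        · exact Or.inl h
        · exact Or.inr ⟨h.1, List.mem_cons_of_mem _ h.2⟩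
      · rintro (h | ⟨hg, hm⟩)
        · exact Or.inl h
        · rcases List.mem_cons.mp hm with rfl | hm
          · exact absurd hg h0
          · exact Or.inr ⟨hg, hm⟩

-- Membership in the frontier set built by A's nested loops.
theorem mem_outer (graphe : List (String × List String)) (l : List (String × Int))
    (ss : List String) (v : String) :
    ∀ acc : List String,
    (v ∈ ss.foldl (fun acc s =>
        (PySem.Dict.getD (PySem.Dict.mk graphe) s []).foldl (fun acc2 x =>
          if (PySem.Dict.mk l).get? x == some 0 then PySem.Set.add acc2 x else acc2) acc) acc)
    ↔ v ∈ acc ∨ ((PySem.Dict.mk l).get? v = some 0 ∧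
        ∃ s ∈ ss, v ∈ PySem.Dict.getD (PySem.Dict.mk graphe) s []) := by
  induction ss with
  | nil => intro acc; simp
  | cons s ss ih =>
    intro acc
    simp only [List.foldl_cons]
    rw [ih, mem_inner]
    constructor
    · rintro ((h | ⟨hg, hm⟩) | ⟨hg, t, ht, hm⟩)
      · exact Or.inl h
      · exact Or.inr ⟨hg, s, List.mem_cons_self .., hm⟩
      · exact Or.inr ⟨hg, t, List.mem_cons_of_mem _ ht, hm⟩
    · rintro (h | ⟨hg, t, ht, hm⟩)
      · exact Or.inl (Or.inl h)
      · rcases List.mem_cons.mp ht with rfl | ht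
        · exact Or.inl (Or.inr ⟨hg, hm⟩)
        · exact Or.inr ⟨hg, t, ht, hm⟩

-- B's single fused fold splits into the dict-building fold and the flag.
theorem foldB (cond : String × Int → Bool) (l : List (String × Int)) :
    ∀ (d : PySem.Dict String Int) (b : Bool),
    l.foldl (fun (st : PySem.Dict String Int × Bool) p =>
        if cond p then (st.1.insert p.1 1, true) else (st.1.insert p.1 p.2, st.2)) (d, b)
    = (l.foldl (fun d p => d.insert p.1 (if cond p then 1 else p.2)) d, b || l.any cond) := by
  induction l with
  | nil => intro d b; simp
  | cons p l ih =>
    intro d b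
    by_cases hc : cond p = true
    · simp only [List.foldl_cons, List.any_cons, hc, if_pos, ih]
      simp
    · simp only [List.foldl_cons, List.any_cons, hc, ih]
      simp

-- the list of burned vertices, the pull-style condition, and A's frontier set
def ssOf (etat : List (String × Int)) : List String :=
  (etat.filter (fun p => p.2 == 1)).map Prod.fst

def condOf (graphe : List (String × List String)) (etat : List (String × Int))
    (p : String × Int) : Bool :=
  p.2 == 0 && (PySem.Set.ofList (ssOf etat)).any
    (fun t => (PySem.Dict.getD (PySem.Dict.mk graphe) t []).contains p.1)

def NOf (graphe : List (String × List String)) (etat : List (String × Int)) : List String :=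
  (ssOf etat).foldl (fun acc s =>
    (PySem.Dict.getD (PySem.Dict.mk graphe) s []).foldl (fun acc2 v =>
      if (PySem.Dict.mk etat).get? v == some 0 then PySem.Set.add acc2 v else acc2) acc) []

theorem A_char (graphe : List (String × List String)) (etat : List (String × Int)) :
    successeurs_p graphe etat
      = (applyN (NOf graphe etat) etat, !(NOf graphe etat).isEmpty) := by
  simp only [successeurs_p]
  rw [show ((PySem.Dict.mk etat : PySem.Dict String Int), false)
        = (PySem.Dict.mk (applyN [] etat), false) from by rw [applyN_nil]]
  rw [outer_eq graphe etat _ [] false rfl]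
  rfl

theorem B_char (graphe : List (String × List String)) (etat : List (String × Int))
    (hnd : (etat.map Prod.fst).Nodup) :
    successeurs_p_alt graphe etat
      = (etat.map (fun p => (p.1, if condOf graphe etat p then 1 else p.2)),
         etat.any (condOf graphe etat)) := by
  simp only [successeurs_p_alt]
  rw [foldB]
  have h1 := PySem.Dict.items_foldl_insert_fresh etat Prod.fst
      (fun p => if condOf graphe etat p then 1 else p.2) PySem.Dict.empty
      (fun a _ => rfl) hnd
  refine Prod.ext ?_ ?_
  · exact h1.trans (List.nil_append _)
  · show (false || etat.any (condOf graphe etat)) = etat.any (condOf graphe etat)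
    exact Bool.false_or _

theorem mem_NOf (graphe : List (String × List String)) (etat : List (String × Int))
    (v : String) :
    v ∈ NOf graphe etat ↔ ((PySem.Dict.mk etat).get? v = some 0 ∧
      ∃ s ∈ ssOf etat, v ∈ PySem.Dict.getD (PySem.Dict.mk graphe) s []) := by
  rw [NOf, mem_outer]
  simp

-- ===== VERDICT (by name: the statement is the Claim_ definition above) =====
theorem successeurs_p_spec : Claim_equal_successeurs_p := by
  intro graphe etat _ hpre
  obtain ⟨hnd, -⟩ := hpre
  show successeurs_p graphe etat = successeurs_p_alt graphe etat
  rw [A_char, B_char graphe etat hnd]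
  have hkeys : (PySem.Dict.mk etat).keys.Nodup := hnd
  have hval : ∀ p ∈ etat, (PySem.Dict.mk etat).get? p.1 = some p.2 := by
    intro p hp
    exact PySem.Dict.get?_of_mem_items _ (by exact hp) hkeys
  have hcontains : ∀ p ∈ etat, (NOf graphe etat).contains p.1 = condOf graphe etat p := by
    intro p hp
    rcases Bool.eq_false_or_eq_true (condOf graphe etat p) with hc | hc
    · -- condOf true: p.1 is in the frontier
      rw [hc]
      have hc2 := hc
      rw [condOf] at hc2
      simp only [Bool.and_eq_true, beq_iff_eq, List.any_eq_true] at hc2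
      obtain ⟨hp2, t, ht, hadj⟩ := hc2
      have : p.1 ∈ NOf graphe etat := by
        rw [mem_NOf]
        exact ⟨by rw [hval p hp, hp2], t, (PySem.Set.mem_ofList ..).mp ht, by simpa using hadj⟩
      simpa using this
    · -- condOf false: p.1 is not in the frontier
      rw [hc, Bool.eq_false_iff]
      intro habs
      have hmem : p.1 ∈ NOf graphe etat := by simpa using habs
      rw [mem_NOf] at hmem
      obtain ⟨h0, s, hs, hadj⟩ := hmem
      have hp2 : p.2 = 0 := by
        have h := hval p hp
        rw [h] at h0
        exact Option.some_inj.mp h0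
      have hct : condOf graphe etat p = true := by
        rw [condOf]
        simp only [Bool.and_eq_true, beq_iff_eq, List.any_eq_true]
        exact ⟨hp2, s, (PySem.Set.mem_ofList ..).mpr hs, by simpa using hadj⟩
      rw [hct] at hc
      exact absurd hc (by simp)
  refine Prod.ext ?_ ?_
  · show applyN (NOf graphe etat) etat
        = etat.map (fun p => (p.1, if condOf graphe etat p then 1 else p.2))
    apply List.map_congr_left
    intro p hp
    rw [hcontains p hp]
  · show (!(NOf graphe etat).isEmpty) = etat.any (condOf graphe etat)
    rcases Bool.eq_false_or_eq_true (etat.any (condOf graphe etat)) with ha | ha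
    · -- some vertex burns: the frontier is nonempty
      rw [ha]
      simp only [List.any_eq_true] at ha
      obtain ⟨p, hp, hc⟩ := ha
      rw [condOf] at hc
      simp only [Bool.and_eq_true, beq_iff_eq, List.any_eq_true] at hc
      obtain ⟨hp2, t, ht, hadj⟩ := hc
      have hmem : p.1 ∈ NOf graphe etat := by
        rw [mem_NOf]
        exact ⟨by rw [hval p hp, hp2], t, (PySem.Set.mem_ofList ..).mp ht, by simpa using hadj⟩
      cases hNn : NOf graphe etat with
      | nil => rw [hNn] at hmem; simp at hmem
      | cons x xs => rfl
    · -- no vertex burns: the frontier is empty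
      rw [ha, Bool.not_eq_false', List.isEmpty_iff]
      by_contra hne
      obtain ⟨v, hv⟩ := List.exists_mem_of_ne_nil (NOf graphe etat) hne
      rw [mem_NOf] at hv
      obtain ⟨h0, s, hs, hadj⟩ := hv
      have hvmem : (v, (0 : Int)) ∈ etat := PySem.Dict.mem_items_of_get?_eq_some _ h0
      have hat : etat.any (condOf graphe etat) = true := by
        simp only [List.any_eq_true]
        refine ⟨(v, 0), hvmem, ?_⟩
        rw [condOf]
        simp only [Bool.and_eq_true, beq_iff_eq, List.any_eq_true]
        exact ⟨trivial, s, (PySem.Set.mem_ofList ..).mpr hs, by simpa using hadj⟩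
      rw [hat] at ha
      exact absurd ha (by simp)
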